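-- pv_equiv track=rewrite | github.com/heyyubov/medical-imaging-fl | src/dataset.py | _is_valid_partition_layout
-- ===== SOURCE A (Python) =====
-- from typing import Dict, List, Sequence, Tuple
--
-- def _is_valid_partition_layout(
--     partitions: Dict[str, List[int]],
--     num_clients: int,
--     num_samples: int,
-- ) -> bool:
--     """Check that partition indices are complete and in range for current dataset."""
--     expected_client_ids = {str(i) for i in range(num_clients)}
--     if set(partitions.keys()) != expected_client_ids:
--         return False
--
--     flat: List[int] = []
--     for idx in partitions.values():
--         flat.extend(idx)
--
--     if len(flat) != num_samples:
--         return False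
--     if len(set(flat)) != num_samples:
--         return False
--     if min(flat, default=0) < 0:
--         return False
--     if max(flat, default=-1) >= num_samples:
--         return False
--     return True
-- ===== SOURCE B (Python) =====
-- def _is_valid_partition_layout(partitions, num_clients, num_samples):
--     """Single early-exit marking pass over the indices instead of four aggregate passes."""
--     if set(partitions.keys()) != {str(i) for i in range(num_clients)}:
--         return False
--     seen = set()
--     for idxs in partitions.values():
--         for idx in idxs:
--             if idx < 0 or idx >= num_samples or idx in seen:
--                 return False
--             seen.add(idx)
--     return len(seen) == num_samples
-- ===== Notes on version B (the rewrite author's own statement) =====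
-- stated objective: alternative
-- what changed: Replaces A's flatten-then-four-aggregate-passes (build flat list, build set, len(set), min, max) by a single early-exit marking pass that checks range and duplicates per index in a seen-set and ends with one cardinality check.
import Mathlib
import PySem

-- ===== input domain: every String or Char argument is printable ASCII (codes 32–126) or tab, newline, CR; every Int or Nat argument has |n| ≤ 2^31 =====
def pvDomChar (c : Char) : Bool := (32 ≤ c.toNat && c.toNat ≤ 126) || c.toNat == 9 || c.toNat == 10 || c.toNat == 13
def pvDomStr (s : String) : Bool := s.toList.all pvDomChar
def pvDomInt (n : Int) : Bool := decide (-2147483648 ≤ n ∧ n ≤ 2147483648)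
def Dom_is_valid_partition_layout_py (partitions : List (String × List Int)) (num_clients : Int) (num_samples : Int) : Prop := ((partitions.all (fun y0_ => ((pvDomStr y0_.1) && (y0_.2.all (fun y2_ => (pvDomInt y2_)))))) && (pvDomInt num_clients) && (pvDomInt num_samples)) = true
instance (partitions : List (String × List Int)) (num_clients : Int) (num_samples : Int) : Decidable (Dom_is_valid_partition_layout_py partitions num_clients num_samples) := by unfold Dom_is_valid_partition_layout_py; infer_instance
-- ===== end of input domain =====

-- B replaces A's flatten-then-four-aggregate-passes (set, len(set), min, max) by a single
-- early-exit marking pass over the indices with a seen-set and a final cardinality check (alternative decomposition).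


-- ===== PORT A =====
-- literal transliteration of A: key-set equality, flatten, then the four aggregate checks
def is_valid_partition_layout_py (partitions : List (String × List Int)) (num_clients : Int) (num_samples : Int) : Bool :=
  -- {str(i) for i in range(num_clients)}: its elements are pairwise distinct, so the set the
  -- comprehension builds is exactly this list in iteration order (Set.ofList would return it unchanged)
  let expected_client_ids : PySem.Set String :=
    ((PySem.List.pyRange 0 num_clients 1).map PySem.Int.toStr)
  if !(PySem.Set.equal (PySem.Set.ofList (partitions.map Prod.fst)) expected_client_ids) then
    false
  else
    let flat : List Int := partitions.foldl (fun acc kv => acc ++ kv.2) []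
    if PySem.List.len flat ≠ num_samples then false
    else if PySem.List.len (PySem.Set.ofList flat) ≠ num_samples then false
    else if ((PySem.List.min? flat (fun x => x)).getD 0) < 0 then false
    else if ((PySem.List.max? flat (fun x => x)).getD (-1)) ≥ num_samples then false
    else true

-- ===== PORT B =====
-- B's inner loop: mark each index in the seen-set, early-exiting (none) on out-of-range or duplicate
def pvMarkIdxs (num_samples : Int) (seen : PySem.Set Int) : List Int → Option (PySem.Set Int)
  | [] => some seen
  | idx :: rest =>
    if idx < 0 || num_samples ≤ idx || PySem.Set.contains seen idx then none
    else pvMarkIdxs num_samples (PySem.Set.add seen idx) rest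

-- B's outer loop over the partition lists
def pvMarkAll (num_samples : Int) (seen : PySem.Set Int) : List (String × List Int) → Option (PySem.Set Int)
  | [] => some seen
  | kv :: rest =>
    match pvMarkIdxs num_samples seen kv.2 with
    | none => none
    | some s => pvMarkAll num_samples s rest

def is_valid_partition_layout_py_alt (partitions : List (String × List Int)) (num_clients : Int) (num_samples : Int) : Bool :=
  if !(PySem.Set.equal (PySem.Set.ofList (partitions.map Prod.fst))
       (((PySem.List.pyRange 0 num_clients 1).map PySem.Int.toStr))) then
    false
  else
    match pvMarkAll num_samples PySem.Set.empty partitions with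
    | none => false
    | some seen => PySem.Set.len seen == num_samples

-- ===== PRECONDITION & SPEC =====
def Spec_is_valid_partition_layout_py (partitions : List (String × List Int)) (num_clients : Int) (num_samples : Int) (out : Bool) : Prop := out = is_valid_partition_layout_py_alt partitions num_clients num_samples
instance (partitions : List (String × List Int)) (num_clients : Int) (num_samples : Int) (out : Bool) : Decidable (Spec_is_valid_partition_layout_py partitions num_clients num_samples out) := by unfold Spec_is_valid_partition_layout_py; infer_instance

-- ===== CLAIM (what is proved, stated in full; the proofs are below) =====
def Claim_equal_is_valid_partition_layout_py : Prop := ∀ (partitions : List (String × List Int)) (num_clients : Int) (num_samples : Int), Dom_is_valid_partition_layout_py partitions num_clients num_samples → Spec_is_valid_partition_layout_py partitions num_clients num_samples (is_valid_partition_layout_py partitions num_clients num_samples)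

-- ===== LEMMAS AND PROOFS =====

-- the common characterisation both programs are proved equal to (used only below the claim)
def pvValidFlat (flat : List Int) (num_samples : Int) : Prop :=
  (flat.length : Int) = num_samples ∧ flat.Nodup ∧ ∀ x ∈ flat, 0 ≤ x ∧ x < num_samples

-- foldl Set.add only appends a sublist of fresh elements
theorem pvFoldlAdd_sublist (xs : List Int) : ∀ s : PySem.Set Int,
    ∃ t, List.foldl PySem.Set.add s xs = s ++ t ∧ t.Sublist xs := by
  induction xs with
  | nil => intro s; exact ⟨[], by simp⟩
  | cons x xs ih =>
    intro s
    simp only [List.foldl_cons]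
    by_cases hc : x ∈ s
    · have ha : PySem.Set.add s x = s := by
        simp [PySem.Set.add, hc]
      rcases ih s with ⟨t, ht, hsub⟩
      exact ⟨t, by rw [ha]; exact ht, hsub.cons _⟩
    · have ha : PySem.Set.add s x = s ++ [x] := by
        simp [PySem.Set.add, hc]
      rcases ih (s ++ [x]) with ⟨t, ht, hsub⟩
      refine ⟨x :: t, by rw [ha, ht]; simp, hsub.cons₂ _⟩

theorem pvOfList_sublist (xs : List Int) : (PySem.Set.ofList xs).Sublist xs := by
  rcases pvFoldlAdd_sublist xs [] with ⟨t, ht, hsub⟩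
  rw [PySem.Set.ofList_eq_foldl, ht]; simpa using hsub

theorem pvMarkIdxs_append (n : Int) (xs ys : List Int) : ∀ s,
    pvMarkIdxs n s (xs ++ ys) =
      match pvMarkIdxs n s xs with
      | none => none
      | some t => pvMarkIdxs n t ys := by
  induction xs with
  | nil => intro s; simp [pvMarkIdxs]
  | cons x xs ih =>
    intro s
    simp only [List.cons_append, pvMarkIdxs]
    split
    · rfl
    · exact ih _

theorem pvMarkAll_eq (n : Int) (ps : List (String × List Int)) : ∀ s,
    pvMarkAll n s ps = pvMarkIdxs n s (ps.flatMap (fun kv => kv.2)) := by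
  induction ps with
  | nil => intro s; simp [pvMarkAll, pvMarkIdxs]
  | cons kv ps ih =>
    intro s
    rw [List.flatMap_cons, pvMarkIdxs_append]
    simp only [pvMarkAll]
    cases pvMarkIdxs n s kv.2 with
    | none => rfl
    | some t => simp [ih]

-- the marking pass succeeds exactly on in-range, duplicate-free, fresh index lists,
-- and then returns the foldl-add of the indices
theorem pvMarkIdxs_some_iff (n : Int) (xs : List Int) : ∀ s : PySem.Set Int,
    pvMarkIdxs n s xs = (if (∀ x ∈ xs, 0 ≤ x ∧ x < n) ∧ xs.Nodup ∧ ∀ x ∈ xs, x ∉ s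
      then some (List.foldl PySem.Set.add s xs) else none) := by
  induction xs with
  | nil => intro s; simp [pvMarkIdxs]
  | cons x xs ih =>
    intro s
    simp only [pvMarkIdxs]
    split
    next h =>
      simp only [Bool.or_eq_true, decide_eq_true_eq, PySem.Set.contains_iff] at h
      rw [if_neg]
      rintro ⟨hr, hnd, hf⟩
      rcases h with (h | h) | h
      · exact absurd (hr x (List.mem_cons_self)).1 (by omega)
      · exact absurd (hr x (List.mem_cons_self)).2 (by omega)
      · exact hf x (List.mem_cons_self) h
    next h =>
      simp only [Bool.or_eq_true, decide_eq_true_eq, PySem.Set.contains_iff, not_or] at h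
      obtain ⟨⟨hx0, hxn⟩, hxs⟩ := h
      rw [ih]
      by_cases hc : (∀ y ∈ xs, 0 ≤ y ∧ y < n) ∧ xs.Nodup ∧ ∀ y ∈ xs, y ∉ PySem.Set.add s x
      · rw [if_pos hc, if_pos]
        · rfl
        · obtain ⟨hr, hnd, hf⟩ := hc
          refine ⟨?_, ?_, ?_⟩
          · intro y hy
            rcases List.mem_cons.mp hy with rfl | hy
            · exact ⟨by omega, by omega⟩
            · exact hr y hy
          · exact List.nodup_cons.mpr
              ⟨fun hx => hf x hx ((PySem.Set.mem_add s x x).mpr (Or.inr rfl)), hnd⟩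
          · intro y hy
            rcases List.mem_cons.mp hy with rfl | hy
            · exact hxs
            · exact fun hys => hf y hy ((PySem.Set.mem_add s x y).mpr (Or.inl hys))
      · rw [if_neg hc, if_neg]
        rintro ⟨hr, hnd, hf⟩
        refine hc ⟨fun y hy => hr y (List.mem_cons_of_mem _ hy), (List.nodup_cons.mp hnd).2,
          fun y hy hmem => ?_⟩
        rcases (PySem.Set.mem_add s x y).mp hmem with hys | rfl
        · exact hf y (List.mem_cons_of_mem _ hy) hys
        · exact (List.nodup_cons.mp hnd).1 hy

-- A's four aggregate checks, on an arbitrary flattened list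
theorem pvA_checks (flat : List Int) (ns : Int) :
    ((if PySem.List.len flat ≠ ns then false
      else if PySem.List.len (PySem.Set.ofList flat) ≠ ns then false
      else if ((PySem.List.min? flat (fun x => x)).getD 0) < 0 then false
      else if ((PySem.List.max? flat (fun x => x)).getD (-1)) ≥ ns then false
      else true) = true) ↔ pvValidFlat flat ns := by
  unfold pvValidFlat
  simp only [PySem.List.len_eq]
  by_cases h1 : (flat.length : Int) = ns
  · rw [if_neg (not_not_intro h1)]
    by_cases h2 : ((PySem.Set.ofList flat).length : Int) = ns
    · rw [if_neg (not_not_intro h2)]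
      have hnd : flat.Nodup := by
        have hsub := pvOfList_sublist flat
        have hlen : (PySem.Set.ofList flat).length = flat.length := by omega
        rw [← hsub.eq_of_length hlen]
        exact PySem.Set.nodup_ofList flat
      cases hmin : PySem.List.min? flat (fun x => x) with
      | none =>
        have hnil := (PySem.List.min?_eq_none_iff flat (fun x => x)).mp hmin
        subst hnil
        simp only [List.length_nil, Nat.cast_zero] at h1
        subst h1
        have hmax0 : PySem.List.max? ([] : List Int) (fun x => x) = none :=
          (PySem.List.max?_eq_none_iff _ _).mpr rfl
        rw [hmax0]
        simp
      | some m =>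
        have hm0 : m ∈ flat := PySem.List.min?_mem hmin
        obtain ⟨M, hmax⟩ : ∃ M, PySem.List.max? flat (fun x => x) = some M := by
          cases hm2 : PySem.List.max? flat (fun x => x) with
          | none =>
            rw [PySem.List.max?_eq_none_iff] at hm2
            subst hm2
            simp at hm0
          | some M => exact ⟨M, rfl⟩
        rw [hmax]
        simp only [Option.getD_some]
        by_cases h3 : m < 0
        · rw [if_pos h3]
          simp only [Bool.false_eq_true, false_iff]
          rintro ⟨-, -, hr⟩
          exact absurd (hr m hm0).1 (by omega)
        · rw [if_neg h3]
          by_cases h4 : M ≥ ns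
          · rw [if_pos h4]
            simp only [Bool.false_eq_true, false_iff]
            rintro ⟨-, -, hr⟩
            exact absurd (hr M (PySem.List.max?_mem hmax)).2 (by omega)
          · rw [if_neg h4]
            constructor
            · intro _
              refine ⟨h1, hnd, fun x hx => ?_⟩
              have h5 : m ≤ x := PySem.List.min?_isMin hmin x hx
              have h6 : x ≤ M := PySem.List.max?_isMax hmax x hx
              omega
            · intro _; rfl
    · rw [if_pos h2]
      simp only [Bool.false_eq_true, false_iff]
      rintro ⟨hlen, hnd, -⟩
      exact h2 (by rw [PySem.Set.ofList_eq_self_of_nodup flat hnd]; exact h1)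
  · rw [if_pos h1]
    simp only [Bool.false_eq_true, false_iff]
    rintro ⟨hlen, -, -⟩
    exact h1 hlen

theorem pvA_true_iff (partitions : List (String × List Int)) (num_clients num_samples : Int)
    (hk : (PySem.Set.equal (PySem.Set.ofList (partitions.map Prod.fst))
       (((PySem.List.pyRange 0 num_clients 1).map PySem.Int.toStr))) = true) :
    (is_valid_partition_layout_py partitions num_clients num_samples = true ↔
      pvValidFlat (partitions.flatMap (fun kv => kv.2)) num_samples) := by
  simp only [is_valid_partition_layout_py, hk, Bool.not_true]
  rw [if_neg Bool.false_ne_true]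
  have hfl : partitions.foldl (fun acc kv => acc ++ kv.2) []
      = partitions.flatMap (fun kv => kv.2) := by
    simpa using PySem.List.foldl_append_eq_flatMap (fun kv => kv.2) partitions []
  rw [hfl]
  exact pvA_checks _ _

theorem pvB_true_iff (partitions : List (String × List Int)) (num_clients num_samples : Int)
    (hk : (PySem.Set.equal (PySem.Set.ofList (partitions.map Prod.fst))
       (((PySem.List.pyRange 0 num_clients 1).map PySem.Int.toStr))) = true) :
    (is_valid_partition_layout_py_alt partitions num_clients num_samples = true ↔
      pvValidFlat (partitions.flatMap (fun kv => kv.2)) num_samples) := by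
  unfold pvValidFlat
  simp only [is_valid_partition_layout_py_alt, hk, Bool.not_true]
  rw [if_neg Bool.false_ne_true]
  rw [show (PySem.Set.empty : PySem.Set Int) = [] from rfl, pvMarkAll_eq, pvMarkIdxs_some_iff]
  set flat := partitions.flatMap (fun kv => kv.2) with hflat
  by_cases hc : (∀ x ∈ flat, 0 ≤ x ∧ x < num_samples) ∧ flat.Nodup
      ∧ ∀ x ∈ flat, x ∉ ([] : List Int)
  · rw [if_pos hc]
    obtain ⟨hr, hnd, -⟩ := hc
    have hfoldl : List.foldl PySem.Set.add [] flat = flat := by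
      rw [← PySem.Set.ofList_eq_foldl]
      exact PySem.Set.ofList_eq_self_of_nodup flat hnd
    show (PySem.Set.len (List.foldl PySem.Set.add [] flat) == num_samples) = true ↔ _
    rw [hfoldl]
    simp only [PySem.Set.len, beq_iff_eq]
    exact ⟨fun h => ⟨h, hnd, hr⟩, fun h => h.1⟩
  · rw [if_neg hc]
    show (false = true) ↔ _
    simp only [Bool.false_eq_true, false_iff]
    rintro ⟨hlen, hnd, hr⟩
    exact hc ⟨hr, hnd, fun x _ h => (List.not_mem_nil).elim h⟩

-- ===== VERDICT (by name: the statement is the Claim_ definition above) =====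
theorem is_valid_partition_layout_py_spec : Claim_equal_is_valid_partition_layout_py := by
  intro partitions num_clients num_samples _
  unfold Spec_is_valid_partition_layout_py
  by_cases hk : (PySem.Set.equal (PySem.Set.ofList (partitions.map Prod.fst))
       (((PySem.List.pyRange 0 num_clients 1).map PySem.Int.toStr))) = true
  · rw [Bool.eq_iff_iff, pvA_true_iff _ _ _ hk, pvB_true_iff _ _ _ hk]
  · have hk' : (PySem.Set.equal (PySem.Set.ofList (partitions.map Prod.fst))
       (((PySem.List.pyRange 0 num_clients 1).map PySem.Int.toStr))) = false :=
      Bool.eq_false_iff.mpr hk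
    simp only [is_valid_partition_layout_py, is_valid_partition_layout_py_alt, hk',
      Bool.not_false]
    rw [if_pos trivial, if_pos trivial]
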